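-- pv_equiv track=rewrite | github.com/danfbrowne/ChessAlgorithm | move.py | moveParse
-- ===== SOURCE A (Python) =====
-- def moveParse(string):
--     letters = 0
--     numbers = 0
--     reqX = None
--     reqY = None
--     destX = None
--     destY = None
--     for i in range(len(string)-1,-1,-1):
--         if (ord(string[i]) > 96 and ord(string[i]) < 105):
--             if destX is None:
--                 destX = ord(string[i]) - 97
--             else:
--                 reqX = ord(string[i]) - 97
--         elif (ord(string[i]) > 48 and ord(string[i]) < 57):
--             if destY is None:
--                 destY = 8 - (ord(string[i]) - 48)
--             else:
--                 reqY = 8 - (ord(string[i]) - 48)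
--
--     return (reqX,reqY,destX,destY)
-- ===== SOURCE B (Python) =====
-- def moveParse(string):
--     letters = [ord(c) for c in string if 96 < ord(c) < 105]
--     digits = [ord(c) for c in string if 48 < ord(c) < 57]
--     reqX = letters[0] - 97 if len(letters) >= 2 else None
--     destX = letters[-1] - 97 if letters else None
--     reqY = 8 - (digits[0] - 48) if len(digits) >= 2 else None
--     destY = 8 - (digits[-1] - 48) if digits else None
--     return (reqX, reqY, destX, destY)
-- ===== Notes on version B (the rewrite author's own statement) =====
-- stated objective: simpler
-- what changed: Replaces the reverse stateful scan with if/else overwrite logic by a partition into letter and digit codes followed by picking the first/last element of each list.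
import Mathlib
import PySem

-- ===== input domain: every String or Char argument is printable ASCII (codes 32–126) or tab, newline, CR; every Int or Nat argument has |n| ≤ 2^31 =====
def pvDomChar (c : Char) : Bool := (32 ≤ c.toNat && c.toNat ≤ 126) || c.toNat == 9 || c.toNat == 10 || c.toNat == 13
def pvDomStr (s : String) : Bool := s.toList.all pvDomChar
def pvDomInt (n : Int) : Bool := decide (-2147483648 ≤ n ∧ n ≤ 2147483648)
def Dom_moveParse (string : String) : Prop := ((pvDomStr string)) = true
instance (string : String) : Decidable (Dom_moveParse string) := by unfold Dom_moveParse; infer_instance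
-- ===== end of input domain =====

-- B replaces A's reverse stateful scan by partitioning the string into letter/digit
-- codes and picking first/last endpoints (objective: simpler).


-- ===== PORT A =====
-- Loop body of A: one step of the reverse scan over the characters.
def moveStepA (s : Option Int × Option Int × Option Int × Option Int) (c : Char) :
    Option Int × Option Int × Option Int × Option Int :=
  let (reqX, reqY, destX, destY) := s
  if 96 < c.toNat ∧ c.toNat < 105 then
    match destX with
    | none => (reqX, reqY, some ((c.toNat : Int) - 97), destY)
    | some _ => (some ((c.toNat : Int) - 97), reqY, destX, destY)
  else if 48 < c.toNat ∧ c.toNat < 57 then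
    match destY with
    | none => (reqX, reqY, destX, some (8 - ((c.toNat : Int) - 48)))
    | some _ => (reqX, some (8 - ((c.toNat : Int) - 48)), destX, destY)
  else
    (reqX, reqY, destX, destY)

-- Python's 'for i in range(len(string)-1,-1,-1)' visits the characters right-to-left.
def moveParse (string : String) : Option Int × Option Int × Option Int × Option Int :=
  string.toList.reverse.foldl moveStepA (none, none, none, none)

-- ===== PORT B =====
def moveParse_alt (string : String) : Option Int × Option Int × Option Int × Option Int :=
  let letters : List Int := (string.toList.filter (fun c => 96 < c.toNat && c.toNat < 105)).map (fun c => (c.toNat : Int))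
  let digits : List Int := (string.toList.filter (fun c => 48 < c.toNat && c.toNat < 57)).map (fun c => (c.toNat : Int))
  let reqX := if 2 ≤ letters.length then letters.head?.map (fun v => v - 97) else none
  let destX := letters.getLast?.map (fun v => v - 97)
  let reqY := if 2 ≤ digits.length then digits.head?.map (fun v => 8 - (v - 48)) else none
  let destY := digits.getLast?.map (fun v => 8 - (v - 48))
  (reqX, reqY, destX, destY)

-- ===== PRECONDITION & SPEC =====
def Spec_moveParse (string : String) (out : Option Int × Option Int × Option Int × Option Int) : Prop := out = moveParse_alt string
instance (string : String) (out : Option Int × Option Int × Option Int × Option Int) : Decidable (Spec_moveParse string out) := by unfold Spec_moveParse; infer_instance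

-- ===== CLAIM (what is proved, stated in full; the proofs are below) =====
def Claim_equal_moveParse : Prop := ∀ (string : String), Dom_moveParse string → Spec_moveParse string (moveParse string)

-- ===== LEMMAS AND PROOFS =====

-- Generic one-axis step: predicate p selects the chars, f their contribution.
def stepAx (p : Char → Bool) (f : Char → Int) (s : Option Int × Option Int) (c : Char) :
    Option Int × Option Int :=
  if p c then
    match s.2 with
    | none => (s.1, some (f c))
    | some _ => (some (f c), s.2)
  else s

theorem moveStepA_split (p q : Char → Bool)
    (hp : ∀ c, p c = decide (96 < c.toNat ∧ c.toNat < 105))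
    (hq : ∀ c, q c = decide (48 < c.toNat ∧ c.toNat < 57))
    (fX fY : Char → Int)
    (hfX : ∀ c, fX c = (c.toNat : Int) - 97)
    (hfY : ∀ c, fY c = 8 - ((c.toNat : Int) - 48))
    (l : List Char) (s : Option Int × Option Int × Option Int × Option Int) :
    l.foldl moveStepA s =
      ((l.foldl (stepAx p fX) (s.1, s.2.2.1)).1,
       (l.foldl (stepAx q fY) (s.2.1, s.2.2.2)).1,
       (l.foldl (stepAx p fX) (s.1, s.2.2.1)).2,
       (l.foldl (stepAx q fY) (s.2.1, s.2.2.2)).2) := by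
  induction l generalizing s with
  | nil => simp
  | cons c t ih =>
    obtain ⟨rx, ry, dx, dy⟩ := s
    have hx : ((moveStepA (rx,ry,dx,dy) c).1, (moveStepA (rx,ry,dx,dy) c).2.2.1)
        = stepAx p fX (rx, dx) c := by
      simp only [moveStepA, stepAx, hp, hfX]
      by_cases h1 : 96 < c.toNat ∧ c.toNat < 105
      · simp only [h1]; cases dx <;> simp
      · by_cases h2 : 48 < c.toNat ∧ c.toNat < 57 <;>
          simp only [h1, h2, decide_false, if_false] <;>
          cases dy <;> simp
    have hy : ((moveStepA (rx,ry,dx,dy) c).2.1, (moveStepA (rx,ry,dx,dy) c).2.2.2)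
        = stepAx q fY (ry, dy) c := by
      simp only [moveStepA, stepAx, hq, hfY]
      by_cases h1 : 96 < c.toNat ∧ c.toNat < 105
      · have h2 : ¬ (48 < c.toNat ∧ c.toNat < 57) := by omega
        simp only [h1, h2, decide_false, if_false]
        cases dx <;> simp
      · by_cases h2 : 48 < c.toNat ∧ c.toNat < 57 <;>
          simp only [h1, h2, decide_false, if_false] <;>
          cases dy <;> simp
    simp only [List.foldl_cons]
    rw [ih, ← hx, ← hy]

-- After dest is already set, every selected char overwrites req; the last one wins.
theorem foldAx_some (p : Char → Bool) (f : Char → Int) (l : List Char) (r : Option Int) (d : Int) :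
    l.foldl (stepAx p f) (r, some d) = (((l.filter p).getLast?.map f).or r, some d) := by
  induction l generalizing r with
  | nil => simp
  | cons c t ih =>
    by_cases h : p c
    · simp [stepAx, h, ih, List.getLast?_cons]
    · simp [stepAx, h, ih]

-- From a fresh state: dest gets the first selected char, req the last of the rest.
theorem foldAx_none (p : Char → Bool) (f : Char → Int) (l : List Char) (r : Option Int) :
    l.foldl (stepAx p f) (r, none) =
      match l.filter p with
      | [] => (r, none)
      | c :: rest => (((rest.getLast?.map f).or r), some (f c)) := by
  induction l generalizing r with
  | nil => simp
  | cons c t ih =>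
    by_cases h : p c
    · simp [stepAx, h, foldAx_some]
    · simp [stepAx, h, ih]

theorem dropLast_head? {α : Type} (l : List α) :
    l.dropLast.head? = if 2 ≤ l.length then l.head? else none := by
  match l with
  | [] => simp
  | [a] => simp
  | a :: b :: t => simp [List.dropLast]

-- The reverse-scan result of one axis equals the endpoint picks on the unreversed list.
theorem axis_char (p : Char → Bool) (f : Char → Int) (l : List Char) :
    l.reverse.foldl (stepAx p f) (none, none) =
      (if 2 ≤ (l.filter p).length then (l.filter p).head?.map f else none,
       (l.filter p).getLast?.map f) := by
  rw [foldAx_none]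
  rw [show (l.reverse.filter p) = (l.filter p).reverse from by simp]
  cases h : (l.filter p).reverse with
  | nil => simp_all
  | cons c rest =>
    have hl : l.filter p = rest.reverse ++ [c] := by
      have := congrArg List.reverse h; simpa using this
    have hrest : rest = (l.filter p).dropLast.reverse := by simp [hl]
    show ((rest.getLast?.map f).or none, some (f c)) = _
    rw [Prod.mk.injEq]
    constructor
    · rw [hrest]
      simp only [List.getLast?_reverse, dropLast_head?]
      split <;> simp
    · simp [hl]

theorem moveParse_eq_alt (string : String) : moveParse string = moveParse_alt string := by
  unfold moveParse moveParse_alt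
  rw [moveStepA_split (fun c => 96 < c.toNat && c.toNat < 105)
        (fun c => 48 < c.toNat && c.toNat < 57)
        (by intro c; simp) (by intro c; simp)
        (fun c => (c.toNat : Int) - 97) (fun c => 8 - ((c.toNat : Int) - 48))
        (fun _ => rfl) (fun _ => rfl)]
  rw [axis_char, axis_char]
  simp [List.head?_map, List.getLast?_map, Option.map_map, Function.comp_def]

-- ===== VERDICT (by name: the statement is the Claim_ definition above) =====
theorem moveParse_spec : Claim_equal_moveParse := by
  intro s _
  unfold Spec_moveParse
  exact moveParse_eq_alt s
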